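-- pv_equiv track=rewrite | github.com/rschaeff/dpam_c2 | dpam/steps/step21_compare_domains.py | get_sequence_distance
-- ===== SOURCE A (Python) =====
-- from typing import Set, List, Tuple
--
-- def get_sequence_distance(
--     resids_a: Set[int],
--     resids_b: Set[int],
--     structured_resids: List[int]
-- ) -> bool:
--     """
--     Check if two domains are connected in sequence space.
--
--     Domains are sequence-connected if any pair of residues (one from each domain)
--     are within 5 positions in the structured region.
--
--     Args:
--         resids_a: Residue set for domain A
--         resids_b: Residue set for domain B
--         structured_resids: Ordered list of all structured residues
--
--     Returns:
--         True if sequence-connected, False otherwise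
--     """
--     # Map residues to indices in structured region
--     resid_to_index = {res: idx for idx, res in enumerate(structured_resids)}
--
--     indices_a = [resid_to_index[res] for res in resids_a if res in resid_to_index]
--     indices_b = [resid_to_index[res] for res in resids_b if res in resid_to_index]
--
--     if not indices_a or not indices_b:
--         return False
--
--     # Check if any pair is within 5 positions
--     for idx_a in indices_a:
--         for idx_b in indices_b:
--             if abs(idx_a - idx_b) <= 5:
--                 return True
--
--     return False
-- ===== SOURCE B (Python) =====
-- def get_sequence_distance(resids_a, resids_b, structured_resids):
--     resid_to_index = {res: idx for idx, res in enumerate(structured_resids)}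
--     indices_a = sorted(resid_to_index[res] for res in resids_a if res in resid_to_index)
--     indices_b = sorted(resid_to_index[res] for res in resids_b if res in resid_to_index)
--     i, j = 0, 0
--     while i < len(indices_a) and j < len(indices_b):
--         if abs(indices_a[i] - indices_b[j]) <= 5:
--             return True
--         if indices_a[i] < indices_b[j]:
--             i += 1
--         else:
--             j += 1
--     return False
-- ===== Notes on version B (the rewrite author's own statement) =====
-- stated objective: alternative
-- what changed: Replaces the all-pairs nested scan over the two index lists by sorting both lists and running a two-pointer merge that advances the pointer at the smaller index.
import Mathlib
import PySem

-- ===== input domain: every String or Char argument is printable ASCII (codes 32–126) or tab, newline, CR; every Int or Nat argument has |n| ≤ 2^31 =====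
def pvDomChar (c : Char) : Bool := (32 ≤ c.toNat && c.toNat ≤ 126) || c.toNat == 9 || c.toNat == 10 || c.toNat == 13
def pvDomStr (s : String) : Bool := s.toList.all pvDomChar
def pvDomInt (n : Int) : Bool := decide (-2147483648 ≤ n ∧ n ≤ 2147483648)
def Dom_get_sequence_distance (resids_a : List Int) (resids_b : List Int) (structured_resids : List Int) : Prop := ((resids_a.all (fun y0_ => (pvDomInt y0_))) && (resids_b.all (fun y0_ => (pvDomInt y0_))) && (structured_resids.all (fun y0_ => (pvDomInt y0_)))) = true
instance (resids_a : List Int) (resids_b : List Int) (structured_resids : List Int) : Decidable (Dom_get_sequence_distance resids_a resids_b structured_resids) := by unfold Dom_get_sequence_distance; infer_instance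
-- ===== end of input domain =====

-- B replaces A's all-pairs double loop by sorting both index lists and a two-pointer merge (alternative algorithm).

-- ===== PORT A =====
def get_sequence_distance (resids_a : List Int) (resids_b : List Int) (structured_resids : List Int) : Bool :=
  -- resid_to_index = {res: idx for idx, res in enumerate(structured_resids)}
  let resid_to_index :=
    (PySem.List.enumerate structured_resids 0).foldl
      (fun d p => d.insert p.2 p.1) (PySem.Dict.empty : PySem.Dict Int Int)
  -- indices_a = [resid_to_index[res] for res in resids_a if res in resid_to_index]
  let indices_a := resids_a.filterMap (fun res => resid_to_index.get? res)
  let indices_b := resids_b.filterMap (fun res => resid_to_index.get? res)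
  if indices_a.isEmpty || indices_b.isEmpty then false
  else
    -- nested loop with early return True
    indices_a.any (fun idx_a => indices_b.any (fun idx_b => decide (|idx_a - idx_b| ≤ 5)))

-- ===== PORT B =====
-- the while loop of Source B: two pointers, each step drops the head of one list
def twoPtr : List Int → List Int → Bool
  | x :: xs, y :: ys =>
    if |x - y| ≤ 5 then true
    else if x < y then twoPtr xs (y :: ys) else twoPtr (x :: xs) ys
  | _, _ => false
termination_by a b => a.length + b.length

def get_sequence_distance_alt (resids_a : List Int) (resids_b : List Int) (structured_resids : List Int) : Bool :=
  let resid_to_index :=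
    (PySem.List.enumerate structured_resids 0).foldl
      (fun d p => d.insert p.2 p.1) (PySem.Dict.empty : PySem.Dict Int Int)
  let indices_a := PySem.List.sorted (resids_a.filterMap (fun res => resid_to_index.get? res)) (fun x => x) false
  let indices_b := PySem.List.sorted (resids_b.filterMap (fun res => resid_to_index.get? res)) (fun x => x) false
  twoPtr indices_a indices_b

-- ===== PRECONDITION & SPEC =====
def Spec_get_sequence_distance (resids_a : List Int) (resids_b : List Int) (structured_resids : List Int) (out : Bool) : Prop := out = get_sequence_distance_alt resids_a resids_b structured_resids
instance (resids_a : List Int) (resids_b : List Int) (structured_resids : List Int) (out : Bool) : Decidable (Spec_get_sequence_distance resids_a resids_b structured_resids out) := by unfold Spec_get_sequence_distance; infer_instance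

-- ===== CLAIM (what is proved, stated in full; the proofs are below) =====
def Claim_equal_get_sequence_distance : Prop := ∀ (resids_a : List Int) (resids_b : List Int) (structured_resids : List Int), Dom_get_sequence_distance resids_a resids_b structured_resids → Spec_get_sequence_distance resids_a resids_b structured_resids (get_sequence_distance resids_a resids_b structured_resids)

-- ===== LEMMAS AND PROOFS =====

-- On sorted lists the two-pointer merge decides exactly the existence of a close pair.
lemma twoPtr_iff (l1 l2 : List Int) (h1 : l1.Pairwise (· ≤ ·)) (h2 : l2.Pairwise (· ≤ ·)) :
    twoPtr l1 l2 = true ↔ ∃ x ∈ l1, ∃ y ∈ l2, |x - y| ≤ 5 := by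
  induction l1, l2 using twoPtr.induct with
  | case1 x xs y ys hle =>
      simp only [twoPtr, if_pos hle]
      exact iff_of_true trivial ⟨x, List.mem_cons_self .., y, List.mem_cons_self .., hle⟩
  | case2 x xs y ys hle hlt ih =>
      rw [twoPtr, if_neg hle, if_pos hlt, ih h1.tail h2]
      constructor
      · rintro ⟨x', hx', y', hy', h⟩
        exact ⟨x', List.mem_cons_of_mem _ hx', y', hy', h⟩
      · rintro ⟨x', hx', y', hy', h⟩
        rcases List.mem_cons.mp hx' with rfl | hx'
        · -- x itself cannot be close to any y' ∈ y::ys: all are ≥ y > x + 5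
          exfalso
          have hne : ¬(-5 ≤ x' - y ∧ x' - y ≤ 5) := fun hh => hle (abs_le.mpr hh)
          have ha := abs_le.mp h
          rcases List.mem_cons.mp hy' with rfl | hy'
          · omega
          · have := List.rel_of_pairwise_cons h2 hy'
            omega
        · exact ⟨x', hx', y', hy', h⟩
  | case3 x xs y ys hle hlt ih =>
      rw [twoPtr, if_neg hle, if_neg hlt, ih h1 h2.tail]
      constructor
      · rintro ⟨x', hx', y', hy', h⟩
        exact ⟨x', hx', y', List.mem_cons_of_mem _ hy', h⟩
      · rintro ⟨x', hx', y', hy', h⟩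
        rcases List.mem_cons.mp hy' with rfl | hy'
        · exfalso
          have hne : ¬(-5 ≤ x - y' ∧ x - y' ≤ 5) := fun hh => hle (abs_le.mpr hh)
          have ha := abs_le.mp h
          rcases List.mem_cons.mp hx' with rfl | hx'
          · omega
          · have := List.rel_of_pairwise_cons h1 hx'
            omega
        · exact ⟨x', hx', y', hy', h⟩
  | case4 l1 l2 hnot =>
      cases l1 with
      | nil => simp [twoPtr]
      | cons x xs =>
        cases l2 with
        | nil => simp [twoPtr]
        | cons y ys => exact (hnot x xs y ys rfl rfl).elim

-- the core equality, for arbitrary index lists p q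
lemma guard_any_eq_twoPtr_sorted (p q : List Int) :
    (if p.isEmpty || q.isEmpty then false
     else p.any (fun x => q.any (fun y => decide (|x - y| ≤ 5))))
    = twoPtr (PySem.List.sorted p (fun x => x) false) (PySem.List.sorted q (fun x => x) false) := by
  have hiff : twoPtr (PySem.List.sorted p (fun x => x) false) (PySem.List.sorted q (fun x => x) false) = true
      ↔ ∃ x ∈ p, ∃ y ∈ q, |x - y| ≤ 5 := by
    rw [twoPtr_iff _ _ (PySem.List.sorted_pairwise p (fun x => x) ) (PySem.List.sorted_pairwise q (fun x => x))]
    simp only [PySem.List.mem_sorted]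
  rw [Bool.eq_iff_iff, hiff]
  by_cases hp : p.isEmpty
  · simp [List.isEmpty_iff.mp hp]
  · by_cases hq : q.isEmpty
    · simp [List.isEmpty_iff.mp hq]
    · simp [hp, hq, List.any_eq_true]

-- ===== VERDICT (by name: the statement is the Claim_ definition above) =====
theorem get_sequence_distance_spec : Claim_equal_get_sequence_distance := by
  intro resids_a resids_b structured_resids _
  unfold Spec_get_sequence_distance get_sequence_distance get_sequence_distance_alt
  exact guard_any_eq_twoPtr_sorted _ _
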